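-- pv_equiv track=rewrite | github.com/htang7415/Code-Lab | modules/software-engineering/tooling/spec-first-ai-coding/python/spec_first_ai_coding.py | review_focus
-- ===== SOURCE A (Python) =====
-- def review_focus(change_tags: list[str]) -> list[str]:
--     normalized = {tag.strip().lower() for tag in change_tags if tag.strip()}
--     focus: list[str] = ["contract"]
--     if normalized.intersection({"api", "schema", "serialization"}):
--         focus.append("compatibility")
--     if normalized.intersection({"mutation", "workflow", "state"}):
--         focus.append("invariants")
--     if normalized.intersection({"ai-generated", "automation"}):
--         focus.append("regression")
--     return focus
-- ===== SOURCE B (Python) =====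
-- def review_focus(change_tags: list[str]) -> list[str]:
--     # Flag-based scan: three booleans instead of sets, with short-circuit
--     # termination once every focus area has already been triggered.
--     compat = inv = reg = False
--     i, n = 0, len(change_tags)
--     while i < n and not (compat and inv and reg):
--         t = change_tags[i].strip().lower()
--         if t in ("api", "schema", "serialization"):
--             compat = True
--         elif t in ("mutation", "workflow", "state"):
--             inv = True
--         elif t in ("ai-generated", "automation"):
--             reg = True
--         i += 1
--     out = ["contract"]
--     if compat:
--         out.append("compatibility")
--     if inv:
--         out.append("invariants")
--     if reg:
--         out.append("regression")
--     return out
-- ===== Notes on version B (the rewrite author's own statement) =====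
-- stated objective: alternative
-- what changed: Replaces A's normalized-set construction plus three set intersections with a flag-based while-loop scan that classifies each tag via an if/elif chain into three booleans and stops early once all three focus areas are triggered; no set is ever built.
import Mathlib
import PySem

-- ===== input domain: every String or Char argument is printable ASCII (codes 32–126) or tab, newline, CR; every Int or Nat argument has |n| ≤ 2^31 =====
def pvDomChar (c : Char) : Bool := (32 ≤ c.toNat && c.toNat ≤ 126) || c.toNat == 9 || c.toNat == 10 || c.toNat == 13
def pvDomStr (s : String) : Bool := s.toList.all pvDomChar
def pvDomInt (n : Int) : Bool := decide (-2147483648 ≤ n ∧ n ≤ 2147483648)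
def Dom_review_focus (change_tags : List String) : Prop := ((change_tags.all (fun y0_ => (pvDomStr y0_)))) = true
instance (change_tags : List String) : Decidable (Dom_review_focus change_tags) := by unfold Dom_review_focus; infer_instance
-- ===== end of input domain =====

-- B replaces A's normalized set + three set intersections with a flag-based scan (three booleans,
-- if/elif classification, early exit once all flags are set); no set is built (objective: alternative).

-- ===== PORT A =====
def review_focus (change_tags : List String) : List String :=
  let normalized : PySem.Set String :=
    change_tags.foldl (fun s tag =>
      if PySem.Str.strip tag ≠ "" then
        PySem.Set.add s (PySem.Str.lower (PySem.Str.strip tag))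
      else s) PySem.Set.empty
  let focus : List String := ["contract"]
  let focus := if PySem.Set.inter normalized (PySem.Set.ofList ["api", "schema", "serialization"]) ≠ [] then focus ++ ["compatibility"] else focus
  let focus := if PySem.Set.inter normalized (PySem.Set.ofList ["mutation", "workflow", "state"]) ≠ [] then focus ++ ["invariants"] else focus
  let focus := if PySem.Set.inter normalized (PySem.Set.ofList ["ai-generated", "automation"]) ≠ [] then focus ++ ["regression"] else focus
  focus

-- ===== PORT B =====
-- Source B's while loop over the remaining tags with three boolean flags and the
-- short-circuit test 'not (compat and inv and reg)'
def bScan : List String → Bool → Bool → Bool → Bool × Bool × Bool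
  | [], compat, inv, reg => (compat, inv, reg)
  | t :: ts, compat, inv, reg =>
    if compat && inv && reg then (compat, inv, reg)
    else
      let s := PySem.Str.lower (PySem.Str.strip t)
      if s ∈ ["api", "schema", "serialization"] then bScan ts true inv reg
      else if s ∈ ["mutation", "workflow", "state"] then bScan ts compat true reg
      else if s ∈ ["ai-generated", "automation"] then bScan ts compat inv true
      else bScan ts compat inv reg

def review_focus_alt (change_tags : List String) : List String :=
  let flags := bScan change_tags false false false
  let out : List String := ["contract"]
  let out := if flags.1 then out ++ ["compatibility"] else out
  let out := if flags.2.1 then out ++ ["invariants"] else out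
  let out := if flags.2.2 then out ++ ["regression"] else out
  out

-- ===== PRECONDITION & SPEC =====
def Spec_review_focus (change_tags : List String) (out : List String) : Prop := out = review_focus_alt change_tags
instance (change_tags : List String) (out : List String) : Decidable (Spec_review_focus change_tags out) := by unfold Spec_review_focus; infer_instance

-- ===== CLAIM (what is proved, stated in full; the proofs are below) =====
def Claim_equal_review_focus : Prop := ∀ (change_tags : List String), Dom_review_focus change_tags → Spec_review_focus change_tags (review_focus change_tags)

-- ===== LEMMAS AND PROOFS =====

def fC (t : String) : Bool := PySem.Str.lower (PySem.Str.strip t) ∈ ["api", "schema", "serialization"]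
def fV (t : String) : Bool := PySem.Str.lower (PySem.Str.strip t) ∈ ["mutation", "workflow", "state"]
def fR (t : String) : Bool := PySem.Str.lower (PySem.Str.strip t) ∈ ["ai-generated", "automation"]

-- the three key lists are pairwise disjoint
lemma disjC (s : String) (h : s ∈ ["api", "schema", "serialization"]) :
    s ∉ ["mutation", "workflow", "state"] ∧ s ∉ ["ai-generated", "automation"] := by
  fin_cases h <;> exact ⟨by decide, by decide⟩

lemma disjV (s : String) (h : s ∈ ["mutation", "workflow", "state"]) :
    s ∉ ["ai-generated", "automation"] := by
  fin_cases h <;> decide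

-- the flag scan computes, despite the early exit, exactly "some tag matches" per category
lemma bScan_eq (l : List String) (c v r : Bool) :
    bScan l c v r = (c || l.any fC, v || l.any fV, r || l.any fR) := by
  induction l generalizing c v r with
  | nil => simp [bScan]
  | cons t ts ih =>
    by_cases hall : c && v && r = true
    · obtain ⟨⟨hc, hv⟩, hr⟩ : (c = true ∧ v = true) ∧ r = true := by
        constructor
        · constructor <;> [skip; skip] <;> simp_all
        · simp_all
      simp [bScan, hc, hv, hr]
    · by_cases h1 : PySem.Str.lower (PySem.Str.strip t) ∈ ["api", "schema", "serialization"]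
      · have hd := disjC _ h1
        have hv' : fV t = false := by unfold fV; simp [hd.1]
        have hr' : fR t = false := by unfold fR; simp [hd.2]
        have hc' : fC t = true := by unfold fC; simp [h1]
        simp [bScan, h1, ih, hc', hv', hr'] <;>
          (intro hc0 hv0 hr0; simp [hc0, hv0, hr0] at hall)
      · by_cases h2 : PySem.Str.lower (PySem.Str.strip t) ∈ ["mutation", "workflow", "state"]
        · have hc' : fC t = false := by unfold fC; simp [h1]
          have hr' : fR t = false := by unfold fR; simp [disjV _ h2]
          have hv' : fV t = true := by unfold fV; simp [h2]
          simp [bScan, h1, h2, ih, hc', hv', hr'] <;>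
          (intro hc0 hv0 hr0; simp [hc0, hv0, hr0] at hall)
        · by_cases h3 : PySem.Str.lower (PySem.Str.strip t) ∈ ["ai-generated", "automation"]
          · have hc' : fC t = false := by unfold fC; simp [h1]
            have hv' : fV t = false := by unfold fV; simp [h2]
            have hr' : fR t = true := by unfold fR; simp [h3]
            simp [bScan, h1, h2, h3, ih, hc', hv', hr'] <;>
          (intro hc0 hv0 hr0; simp [hc0, hv0, hr0] at hall)
          · have hc' : fC t = false := by unfold fC; simp [h1]
            have hv' : fV t = false := by unfold fV; simp [h2]
            have hr' : fR t = false := by unfold fR; simp [h3]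
            simp [bScan, h1, h2, h3, ih, hc', hv', hr'] <;>
          (intro hc0 hv0 hr0; simp [hc0, hv0, hr0] at hall)

def normFoldA (l : List String) : PySem.Set String :=
  l.foldl (fun s tag =>
    if PySem.Str.strip tag ≠ "" then
      PySem.Set.add s (PySem.Str.lower (PySem.Str.strip tag))
    else s) PySem.Set.empty

-- membership in A's normalized-set fold
lemma memA (l : List String) (acc : PySem.Set String) (x : String) :
    x ∈ l.foldl (fun s tag =>
      if PySem.Str.strip tag ≠ "" then
        PySem.Set.add s (PySem.Str.lower (PySem.Str.strip tag))
      else s) acc ↔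
    x ∈ acc ∨ ∃ t ∈ l, PySem.Str.strip t ≠ "" ∧ x = PySem.Str.lower (PySem.Str.strip t) := by
  induction l generalizing acc with
  | nil => simp
  | cons h tl ih =>
    simp only [List.foldl_cons]
    by_cases hs : PySem.Str.strip h = ""
    · rw [if_neg (by simp [hs]), ih]
      simp [hs]
    · rw [if_pos hs, ih]
      simp only [PySem.Set.mem_add, List.mem_cons]
      constructor
      · rintro ((hx | hx) | ⟨t, ht, h1, h2⟩)
        · exact Or.inl hx
        · exact Or.inr ⟨h, Or.inl rfl, hs, hx⟩
        · exact Or.inr ⟨t, Or.inr ht, h1, h2⟩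
      · rintro (hx | ⟨t, (rfl | ht), h1, h2⟩)
        · exact Or.inl (Or.inl hx)
        · exact Or.inl (Or.inr h2)
        · exact Or.inr ⟨t, ht, h1, h2⟩

lemma memA' (l : List String) (x : String) :
    x ∈ normFoldA l ↔ ∃ t ∈ l, PySem.Str.strip t ≠ "" ∧ x = PySem.Str.lower (PySem.Str.strip t) := by
  unfold normFoldA
  rw [memA]
  simp [PySem.Set.empty]

-- a tag whose normalization is a nonempty key has a nonempty strip
lemma strip_ne_of_norm (t k : String) (hk : k ≠ "") (h : PySem.Str.lower (PySem.Str.strip t) = k) :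
    PySem.Str.strip t ≠ "" := by
  intro he
  subst h
  rw [he] at hk
  exact hk (by decide)

-- A's set-intersection test equals "some tag normalizes into the key list"
lemma cond_iff (l : List String) (keys : List String) (hkeys : "" ∉ keys) :
    (PySem.Set.inter (normFoldA l) (PySem.Set.ofList keys) ≠ []) ↔
    (l.any (fun t => PySem.Str.lower (PySem.Str.strip t) ∈ keys) = true) := by
  rw [List.any_eq_true]
  constructor
  · intro hne
    obtain ⟨x, hx⟩ := List.exists_mem_of_ne_nil _ hne
    rw [PySem.Set.mem_inter] at hx
    obtain ⟨hxN, hxg⟩ := hx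
    rw [memA'] at hxN
    obtain ⟨t, ht, hs, rfl⟩ := hxN
    exact ⟨t, ht, by simp [(PySem.Set.mem_ofList _ _).mp hxg]⟩
  · rintro ⟨t, ht, hm⟩
    have hk : PySem.Str.lower (PySem.Str.strip t) ∈ keys := by simpa using hm
    intro he
    have hmem : PySem.Str.lower (PySem.Str.strip t) ∈
        PySem.Set.inter (normFoldA l) (PySem.Set.ofList keys) := by
      rw [PySem.Set.mem_inter]
      refine ⟨?_, (PySem.Set.mem_ofList _ _).mpr hk⟩
      rw [memA']
      exact ⟨t, ht, strip_ne_of_norm t _ (fun h0 => hkeys (h0 ▸ hk)) rfl, rfl⟩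
    rw [he] at hmem
    cases hmem

-- ===== VERDICT (by name: the statement is the Claim_ definition above) =====
theorem review_focus_spec : Claim_equal_review_focus := by
  intro l _
  show review_focus l = review_focus_alt l
  have c1 := cond_iff l ["api", "schema", "serialization"] (by decide)
  have c2 := cond_iff l ["mutation", "workflow", "state"] (by decide)
  have c3 := cond_iff l ["ai-generated", "automation"] (by decide)
  unfold review_focus review_focus_alt
  rw [show (l.foldl (fun s tag =>
      if PySem.Str.strip tag ≠ "" then
        PySem.Set.add s (PySem.Str.lower (PySem.Str.strip tag))
      else s) PySem.Set.empty) = normFoldA l from rfl]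
  rw [bScan_eq]
  simp only [c1, c2, c3, Bool.false_or]
  rfl
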